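-- pv_equiv track=rewrite | github.com/joonofafa/martani-ai-cloud | backend/app/services/document/spreadsheet_parser.py | _split_regions
-- ===== SOURCE A (Python) =====
-- def _split_regions(rows: list[list[str]]) -> list[list[list[str]]]:
--     """Split rows into regions separated by 2+ consecutive blank rows."""
--     regions = []
--     current_region = []
--     blank_count = 0
--
--     for row in rows:
--         is_blank = all(not cell.strip() for cell in row)
--         if is_blank:
--             blank_count += 1
--             if blank_count >= 2 and current_region:
--                 regions.append(current_region)
--                 current_region = []
--         else:
--             if blank_count == 1 and current_region:
--                 # Single blank row — keep in region
--                 current_region.append([""] * len(row))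
--             blank_count = 0
--             current_region.append(row)
--
--     if current_region:
--         regions.append(current_region)
--
--     return regions
-- ===== SOURCE B (Python) =====
-- def _split_regions(rows: list[list[str]]) -> list[list[list[str]]]:
--     """Split rows into regions separated by 2+ consecutive blank rows.
--
--     Two-phase: collapse rows into maximal runs of equal blankness, then
--     fold over the runs with a pending-single-blank flag.
--     """
--     runs = []  # list of [is_blank, rows_of_run]
--     for row in rows:
--         b = all(not cell.strip() for cell in row)
--         if runs and runs[-1][0] == b:
--             runs[-1][1].append(row)
--         else:
--             runs.append([b, [row]])
--
--     regions = []
--     current = []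
--     pending = False
--     for b, run in runs:
--         if b:
--             if len(run) >= 2:
--                 if current:
--                     regions.append(current)
--                     current = []
--                 pending = False
--             else:
--                 pending = bool(current)
--         else:
--             if pending:
--                 current.append([""] * len(run[0]))
--                 pending = False
--             current.extend(run)
--     if current:
--         regions.append(current)
--     return regions
-- ===== Notes on version B (the rewrite author's own statement) =====
-- stated objective: alternative
-- what changed: Replaces A's single pass with a running blank-row counter by a two-phase algorithm: first collapse the rows into maximal runs of equal blankness, then fold over the runs with a pending-single-blank flag, flushing on blank runs of length >= 2.
import Mathlib
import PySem

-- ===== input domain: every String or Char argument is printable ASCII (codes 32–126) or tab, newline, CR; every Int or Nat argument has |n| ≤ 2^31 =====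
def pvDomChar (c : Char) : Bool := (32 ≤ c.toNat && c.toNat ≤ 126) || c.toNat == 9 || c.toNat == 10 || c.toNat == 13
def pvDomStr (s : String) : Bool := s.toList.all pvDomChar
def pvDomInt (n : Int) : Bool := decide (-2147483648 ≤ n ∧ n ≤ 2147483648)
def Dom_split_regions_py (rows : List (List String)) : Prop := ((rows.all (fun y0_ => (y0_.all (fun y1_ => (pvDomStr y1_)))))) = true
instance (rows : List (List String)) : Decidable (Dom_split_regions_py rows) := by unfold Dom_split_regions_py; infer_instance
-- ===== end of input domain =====

-- B replaces A's single loop with a blank-row counter by a two-phase pass: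
-- group rows into maximal runs of equal blankness, then fold over the runs
-- with a pending-single-blank flag (objective: alternative decomposition).

-- ===== PORT A =====

-- is_blank = all(not cell.strip() for cell in row)
def pvBlankRow (row : List String) : Bool := row.all (fun c => PySem.Str.strip c == "")

-- one iteration of A's `for row in rows` over state (regions, current_region, blank_count)
def pvStepA (s : List (List (List String)) × List (List String) × Int) (row : List String) :
    List (List (List String)) × List (List String) × Int :=
  if pvBlankRow row then
    if 2 ≤ s.2.2 + 1 ∧ s.2.1 ≠ [] then (s.1 ++ [s.2.1], [], s.2.2 + 1)
    else (s.1, s.2.1, s.2.2 + 1)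
  else
    (s.1,
     (if s.2.2 = 1 ∧ s.2.1 ≠ [] then s.2.1 ++ [List.replicate row.length ""] else s.2.1) ++ [row],
     0)

def split_regions_py (rows : List (List String)) : List (List (List String)) :=
  let s := rows.foldl pvStepA ([], [], 0)
  if s.2.1 ≠ [] then s.1 ++ [s.2.1] else s.1

-- ===== PORT B =====

-- phase 1 step: append row to the last run if its blankness matches, else start a new run
def pvStepG (runs : List (Bool × List (List String))) (row : List String) :
    List (Bool × List (List String)) :=
  let b := pvBlankRow row
  match runs.getLast? with
  | some g => if g.1 = b then runs.dropLast ++ [(g.1, g.2 ++ [row])] else runs ++ [(b, [row])]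
  | none => [(b, [row])]

-- phase 2 step over state (regions, current, pending);  run[0] ported as headD [] (runs are nonempty)
def pvStepB (s : List (List (List String)) × List (List String) × Bool)
    (g : Bool × List (List String)) :
    List (List (List String)) × List (List String) × Bool :=
  if g.1 then
    if 2 ≤ g.2.length then
      ((if s.2.1 ≠ [] then s.1 ++ [s.2.1] else s.1), [], false)
    else (s.1, s.2.1, s.2.1 ≠ [])
  else
    (s.1,
     (if s.2.2 then s.2.1 ++ [List.replicate (g.2.headD []).length ""] else s.2.1) ++ g.2,
     false)

def split_regions_py_alt (rows : List (List String)) : List (List (List String)) :=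
  let runs := rows.foldl pvStepG []
  let s := runs.foldl pvStepB ([], [], false)
  if s.2.1 ≠ [] then s.1 ++ [s.2.1] else s.1

-- ===== PRECONDITION & SPEC =====
def Spec_split_regions_py (rows : List (List String)) (out : List (List (List String))) : Prop := out = split_regions_py_alt rows
instance (rows : List (List String)) (out : List (List (List String))) : Decidable (Spec_split_regions_py rows out) := by unfold Spec_split_regions_py; infer_instance

-- ===== CLAIM (what is proved, stated in full; the proofs are below) =====
def Claim_equal_split_regions_py : Prop := ∀ (rows : List (List String)), Dom_split_regions_py rows → Spec_split_regions_py rows (split_regions_py rows)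

-- ===== LEMMAS AND PROOFS =====

-- finalize: `if current_region: regions.append(current_region)` (ignores the third component)
def pvFin (regs : List (List (List String))) (cur : List (List String)) : List (List (List String)) :=
  if cur ≠ [] then regs ++ [cur] else regs

-- head of dropWhile fails the predicate
theorem pvDropWhile_head_false {α : Type} (p : α → Bool) (l : List α) (x : α) (xs : List α)
    (h : l.dropWhile p = x :: xs) : p x = false := by
  induction l with
  | nil => simp at h
  | cons a t ih =>
    rw [List.dropWhile_cons] at h
    split at h
    · exact ih h
    · cases h; simp_all

-- A over a run of non-blank rows from blank_count = 0 just extends current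
theorem pvFoldA_nonblank (xs : List (List String)) (h : ∀ x ∈ xs, pvBlankRow x = false) :
    ∀ regs cur, xs.foldl pvStepA (regs, cur, 0) = (regs, cur ++ xs, 0) := by
  induction xs with
  | nil => simp
  | cons x t ih =>
    intro regs cur
    have hx : pvBlankRow x = false := h x (by simp)
    simp only [List.foldl_cons]
    rw [show pvStepA (regs, cur, 0) x = (regs, cur ++ [x], 0) by
      simp [pvStepA, hx]]
    rw [ih (fun y hy => h y (by simp [hy])) regs (cur ++ [x])]
    simp

-- A over blank rows with empty current just counts
theorem pvFoldA_blank_empty (xs : List (List String)) (h : ∀ x ∈ xs, pvBlankRow x = true) :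
    ∀ regs (k : Int), xs.foldl pvStepA (regs, [], k) = (regs, [], k + xs.length) := by
  induction xs with
  | nil => simp
  | cons x t ih =>
    intro regs k
    have hx : pvBlankRow x = true := h x (by simp)
    simp only [List.foldl_cons]
    rw [show pvStepA (regs, ([] : List (List String)), k) x = (regs, [], k + 1) by
      simp [pvStepA, hx]]
    rw [ih (fun y hy => h y (by simp [hy])) regs (k + 1)]
    simp; ring

-- phase-1 grouping never touches a strict prefix of the accumulator
theorem pvFoldG_prefix (xs : List (List String)) :
    ∀ (acc l : List (Bool × List (List String))), l ≠ [] →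
      (xs.foldl pvStepG (acc ++ l) = acc ++ xs.foldl pvStepG l ∧ xs.foldl pvStepG l ≠ []) := by
  induction xs with
  | nil => intro acc l hl; exact ⟨rfl, hl⟩
  | cons x t ih =>
    intro acc l hl
    have hstep : pvStepG (acc ++ l) x = acc ++ pvStepG l x := by
      simp only [pvStepG, List.getLast?_append]
      rcases List.exists_cons_of_ne_nil hl with ⟨a, l', rfl⟩
      cases hg : (a :: l').getLast? with
      | none => simp at hg
      | some g =>
        simp only [Option.some_or]
        split
        · rw [List.dropLast_append]
          simp [List.append_assoc]
        · simp [List.append_assoc]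
    have hne : pvStepG l x ≠ [] := by
      simp only [pvStepG]
      cases hg : l.getLast? with
      | none => simp
      | some g => simp only [hg]; split <;> simp
    simp only [List.foldl_cons, hstep]
    exact ih acc (pvStepG l x) hne

-- extending the sole run with rows of the same blankness
theorem pvFoldG_homog (xs : List (List String)) (b : Bool) (h : ∀ x ∈ xs, pvBlankRow x = b) :
    ∀ run, xs.foldl pvStepG [(b, run)] = [(b, run ++ xs)] := by
  induction xs with
  | nil => simp
  | cons x t ih =>
    intro run
    have hx : pvBlankRow x = b := h x (by simp)
    simp only [List.foldl_cons]
    rw [show pvStepG [(b, run)] x = [(b, run ++ [x])] by simp [pvStepG, hx]]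
    rw [ih (fun y hy => h y (by simp [hy])) (run ++ [x])]
    simp

-- grouping peels off the first maximal run
theorem pvFoldG_decomp (r : List String) (rs : List (List String)) :
    (r :: rs).foldl pvStepG [] =
      (pvBlankRow r, r :: rs.takeWhile (fun x => pvBlankRow x = pvBlankRow r)) ::
        (rs.dropWhile (fun x => pvBlankRow x = pvBlankRow r)).foldl pvStepG [] := by
  set b := pvBlankRow r with hb
  set same := rs.takeWhile (fun x => pvBlankRow x = b)
  set rest := rs.dropWhile (fun x => pvBlankRow x = b) with hrest
  have hsplit : rs = same ++ rest := (List.takeWhile_append_dropWhile).symm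
  have hsame : ∀ x ∈ same, pvBlankRow x = b := by
    intro x hx
    have := List.mem_takeWhile_imp hx
    simpa using this
  calc (r :: rs).foldl pvStepG []
      = rs.foldl pvStepG [(b, [r])] := by
        simp only [List.foldl_cons]
        rw [show pvStepG [] r = [(b, [r])] from by rw [hb]; rfl]
    _ = rest.foldl pvStepG [(b, [r] ++ same)] := by
        rw [hsplit, List.foldl_append, pvFoldG_homog same b hsame]
    _ = (b, r :: same) :: rest.foldl pvStepG [] := by
        cases hr : rest with
        | nil => simp
        | cons x xs =>
          have hx : pvBlankRow x ≠ b := by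
            have := pvDropWhile_head_false _ rs x xs (by rw [← hrest, hr])
            simpa using this
          have hstep : pvStepG [(b, [r] ++ same)] x = [(b, [r] ++ same)] ++ [(pvBlankRow x, [x])] := by
            simp [pvStepG, Ne.symm hx]
          have hxs := pvFoldG_prefix xs [(b, [r] ++ same)] [(pvBlankRow x, [x])] (by simp)
          simp only [List.foldl_cons, hstep]
          rw [hxs.1, show pvStepG [] x = [(pvBlankRow x, [x])] from rfl]
          simp

-- the main correspondence: A's fold from (regs, cur, 0) vs B's fold over the runs from (regs, cur, false)
theorem pvMain : ∀ (n : Nat) (rows : List (List String)), rows.length ≤ n →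
    ∀ regs cur,
      (let s := rows.foldl pvStepA (regs, cur, 0); pvFin s.1 s.2.1) =
      (let s := (rows.foldl pvStepG []).foldl pvStepB (regs, cur, false); pvFin s.1 s.2.1) := by
  intro n
  induction n with
  | zero =>
    intro rows hlen regs cur
    have : rows = [] := List.eq_nil_of_length_eq_zero (Nat.le_zero.mp hlen)
    subst this; rfl
  | succ n ih =>
    intro rows hlen regs cur
    cases rows with
    | nil => rfl
    | cons r rs =>
      set b := pvBlankRow r with hb
      set same := rs.takeWhile (fun x => pvBlankRow x = b) with hsame_def
      set rest := rs.dropWhile (fun x => pvBlankRow x = b) with hrest_def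
      have hsplit : rs = same ++ rest := (List.takeWhile_append_dropWhile).symm
      have hsame : ∀ x ∈ same, pvBlankRow x = b := by
        intro x hx; simpa using List.mem_takeWhile_imp hx
      have hlen_rest : rest.length ≤ rs.length := List.length_dropWhile_le _ _
      have hlen_rs : rs.length ≤ n := by simpa using Nat.lt_succ_iff.mp (by simpa using hlen)
      have hG : (r :: rs).foldl pvStepG [] = (b, r :: same) :: rest.foldl pvStepG [] :=
        pvFoldG_decomp r rs
      have hA : (r :: rs).foldl pvStepA (regs, cur, 0) =
          rest.foldl pvStepA ((r :: same).foldl pvStepA (regs, cur, 0)) := by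
        conv_lhs => rw [show (r :: rs) = (r :: same) ++ rest by rw [hsplit, List.cons_append]]
        rw [List.foldl_append]
      cases hbv : b with
      | false =>
        -- non-blank run: both sides extend current with the run
        have hnb : ∀ x ∈ r :: same, pvBlankRow x = false := by
          intro x hx
          rcases List.mem_cons.mp hx with h | h
          · subst h; rw [← hb, hbv]
          · rw [hsame x h, hbv]
        rw [hA, pvFoldA_nonblank _ hnb regs cur, hG]
        simp only [List.foldl_cons]
        rw [show pvStepB (regs, cur, false) (b, r :: same) = (regs, cur ++ (r :: same), false) by
          simp [pvStepB, hbv]]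
        exact ih rest (le_trans hlen_rest hlen_rs) regs (cur ++ (r :: same))
      | true =>
        have hrb : pvBlankRow r = true := by rw [← hb, hbv]
        cases hsm : same with
        | nil =>
          -- single blank row
          simp only [hsm] at hG hA
          have hA1 : pvStepA (regs, cur, 0) r = (regs, cur, 1) := by
            simp [pvStepA, hrb]
          have hB1 : pvStepB (regs, cur, false) (b, [r]) =
              (regs, cur, decide (cur ≠ [])) := by
            simp [pvStepB, hbv]
          rw [hA, hG]
          simp only [List.foldl_cons, hA1, hB1]
          cases hr : rest with
          | nil => simp [pvFin]
          | cons x xs =>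
            have hx : pvBlankRow x = false := by
              have := pvDropWhile_head_false _ rs x xs (by rw [← hrest_def, hr])
              simpa [hbv] using this
            -- decompose rest into its first (non-blank) run and the remainder
            set same2 := xs.takeWhile (fun y => pvBlankRow y = pvBlankRow x) with hs2
            set rest2 := xs.dropWhile (fun y => pvBlankRow y = pvBlankRow x) with hr2
            have hsplit2 : xs = same2 ++ rest2 := (List.takeWhile_append_dropWhile).symm
            have hnb2 : ∀ y ∈ same2, pvBlankRow y = false := by
              intro y hy
              have := List.mem_takeWhile_imp hy
              simpa [hx] using this
            have hG2 : (x :: xs).foldl pvStepG [] =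
                (pvBlankRow x, x :: same2) :: rest2.foldl pvStepG [] := pvFoldG_decomp x xs
            set cur1 := (if cur ≠ [] then cur ++ [List.replicate x.length ""] else cur) with hc1
            have hA2 : pvStepA (regs, cur, 1) x = (regs, cur1 ++ [x], 0) := by
              simp only [pvStepA, hx, Bool.false_eq_true, if_false, hc1]
              norm_num
            have hB2 : pvStepB (regs, cur, decide (cur ≠ [])) (pvBlankRow x, x :: same2) =
                (regs, cur1 ++ (x :: same2), false) := by
              simp only [pvStepB, hx, Bool.false_eq_true, if_false, hc1]
              by_cases hc : cur = [] <;> simp [hc]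
            have hlen2 : rest2.length ≤ n := by
              have h1 : rest2.length ≤ xs.length := List.length_dropWhile_le _ _
              have h2 : (x :: xs).length ≤ rs.length := by
                rw [← hr]; exact List.length_dropWhile_le _ _
              simp at h2
              omega
            calc (let s := (x :: xs).foldl pvStepA (regs, cur, 1); pvFin s.1 s.2.1)
                = (let s := rest2.foldl pvStepA (regs, cur1 ++ (x :: same2), 0); pvFin s.1 s.2.1) := by
                  conv_lhs => rw [show (x :: xs) = (x :: same2) ++ rest2 by rw [hsplit2, List.cons_append]]
                  rw [List.foldl_append]
                  simp only [List.foldl_cons, hA2]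
                  rw [pvFoldA_nonblank same2 hnb2 regs (cur1 ++ [x])]
                  simp
              _ = (let s := (rest2.foldl pvStepG []).foldl pvStepB (regs, cur1 ++ (x :: same2), false);
                    pvFin s.1 s.2.1) := ih rest2 hlen2 regs (cur1 ++ (x :: same2))
              _ = (let s := ((x :: xs).foldl pvStepG []).foldl pvStepB (regs, cur, decide (cur ≠ []));
                    pvFin s.1 s.2.1) := by
                  rw [hG2]
                  simp only [List.foldl_cons, hB2]
        | cons s1 same' =>
          -- run of ≥ 2 blanks: flush
          have hs1 : pvBlankRow s1 = true := by
            have := hsame s1 (by rw [hsm]; simp)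
            rw [this, hbv]
          have hsame' : ∀ y ∈ same', pvBlankRow y = true := by
            intro y hy
            have := hsame y (by rw [hsm]; simp [hy])
            rw [this, hbv]
          simp only [hsm] at hG hA
          set regs' := (if cur ≠ [] then regs ++ [cur] else regs) with hregs'
          have hA1 : pvStepA (regs, cur, 0) r = (regs, cur, 1) := by simp [pvStepA, hrb]
          have hA2 : pvStepA (regs, cur, 1) s1 = (regs', [], 2) := by
            simp only [pvStepA, hs1, if_true, hregs']
            by_cases hc : cur = [] <;> simp [hc]
          have hB1 : pvStepB (regs, cur, false) (b, r :: s1 :: same') = (regs', [], false) := by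
            simp [pvStepB, hbv, hregs']
          rw [hA, hG]
          simp only [List.foldl_cons, hA1, hA2, hB1]
          rw [pvFoldA_blank_empty same' hsame' regs' 2]
          cases hr : rest with
          | nil => simp [pvFin]
          | cons x xs =>
            have hx : pvBlankRow x = false := by
              have := pvDropWhile_head_false _ rs x xs (by rw [← hrest_def, hr])
              simpa [hbv] using this
            have hstepK : pvStepA (regs', ([] : List (List String)), 2 + (same'.length : Int)) x
                = pvStepA (regs', ([] : List (List String)), 0) x := by
              simp [pvStepA, hx]
            have hlenr : (x :: xs).length ≤ n := by
              have : (x :: xs).length ≤ rs.length := by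
                rw [← hr]; exact List.length_dropWhile_le _ _
              omega
            simp only [List.foldl_cons, hstepK]
            have := ih (x :: xs) hlenr regs' []
            simpa only [List.foldl_cons] using this

-- ===== VERDICT (by name: the statement is the Claim_ definition above) =====
theorem split_regions_py_spec : Claim_equal_split_regions_py := by
  intro rows _
  show split_regions_py rows = split_regions_py_alt rows
  have := pvMain rows.length rows (le_refl _) [] []
  simpa [split_regions_py, split_regions_py_alt, pvFin] using this
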